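-- pv_equiv track=rewrite | github.com/Chalon-xct/chord-practice-app | backend/midi_generator.py | get_chord_midi_numbers
-- ===== SOURCE A (Python) =====
-- INTERVALS = {
--     'major': [0, 4, 7],
--     'minor': [0, 3, 7],
--     'dim': [0, 3, 6],
--     'aug': [0, 4, 8],
--     'maj7': [0, 4, 7, 11],
--     'm7': [0, 3, 7, 10],
--     '7': [0, 4, 7, 10],
--     'sus4': [0, 5, 7],
--     'sus2': [0, 2, 7]
-- }
--
-- SEMITONES = {
--     'C': 0, 'C#': 1, 'Db': 1, 'D': 2, 'D#': 3, 'Eb': 3,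
--     'E': 4, 'F': 5, 'F#': 6, 'Gb': 6, 'G': 7, 'G#': 8,
--     'Ab': 8, 'A': 9, 'A#': 10, 'Bb': 10, 'B': 11
-- }
--
-- NOTE_NAMES = ['C', 'C#', 'D', 'D#', 'E', 'F', 'F#', 'G', 'G#', 'A', 'A#', 'B']
--
-- def note_to_midi_number(note_name, octave):
--     semitone = SEMITONES.get(note_name, 0)
--     return 12 * (octave + 1) + semitone
--
-- def parse_chord_name(chord_name):
--     for suffix in ['maj7', 'm7', 'sus4', 'sus2', 'dim', 'aug', 'min', 'minor', '7']:
--         if chord_name.endswith(suffix):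
--             if suffix == 'minor':
--                 suffix = 'min'
--             root = chord_name[:-len(suffix)]
--             return root, suffix
--     if chord_name.endswith('m'):
--         return chord_name[:-1], 'minor'
--     return chord_name, 'major'
--
-- def get_chord_midi_numbers(chord_name, octave=4):
--     root, chord_type = parse_chord_name(chord_name)
--     intervals = INTERVALS.get(chord_type, INTERVALS['major'])
--
--     root_semitone = SEMITONES.get(root, 0)
--     midi_numbers = []
--
--     for interval in intervals:
--         note_semitone = root_semitone + interval
--         note_octave = octave + note_semitone // 12
--         note_semitone = note_semitone % 12
--         midi_num = note_to_midi_number(NOTE_NAMES[note_semitone], note_octave)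
--         midi_numbers.append(midi_num)
--
--     return midi_numbers
-- ===== SOURCE B (Python) =====
-- # B encodes each chord as stacked interval STEPS (deltas between successive
-- # chord tones) and builds the notes with a running-pitch accumulator, instead
-- # of A's absolute-interval list with per-note octave/pitch-class round-trip.
--
-- SEMITONES = {
--     'C': 0, 'C#': 1, 'Db': 1, 'D': 2, 'D#': 3, 'Eb': 3,
--     'E': 4, 'F': 5, 'F#': 6, 'Gb': 6, 'G': 7, 'G#': 8,
--     'Ab': 8, 'A': 9, 'A#': 10, 'Bb': 10, 'B': 11
-- }
--
-- # deltas between successive chord tones (stacked thirds/fourths/seconds)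
-- STEPS = {
--     'major': [4, 3],
--     'minor': [3, 4],
--     'dim': [3, 3],
--     'aug': [4, 4],
--     'maj7': [4, 3, 4],
--     'm7': [3, 4, 3],
--     '7': [4, 3, 3],
--     'sus4': [5, 2],
--     'sus2': [2, 5]
-- }
--
-- def parse_chord_name(chord_name):
--     for suffix in ['maj7', 'm7', 'sus4', 'sus2', 'dim', 'aug', 'min', 'minor', '7']:
--         if chord_name.endswith(suffix):
--             if suffix == 'minor':
--                 suffix = 'min'
--             root = chord_name[:-len(suffix)]
--             return root, suffix
--     if chord_name.endswith('m'):
--         return chord_name[:-1], 'minor'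
--     return chord_name, 'major'
--
-- def get_chord_midi_numbers(chord_name, octave=4):
--     root, chord_type = parse_chord_name(chord_name)
--     steps = STEPS.get(chord_type, STEPS['major'])
--     note = 12 * (octave + 1) + SEMITONES.get(root, 0)
--     notes = [note]
--     for step in steps:
--         note += step
--         notes.append(note)
--     return notes
-- ===== Notes on version B (the rewrite author's own statement) =====
-- stated objective: alternative
-- what changed: B stores each chord as stacked interval steps (deltas between successive tones) and builds the notes with a running-pitch accumulator, replacing A's absolute-interval list with its per-note //12, %12 and note-name dict round-trip.
import Mathlib
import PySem

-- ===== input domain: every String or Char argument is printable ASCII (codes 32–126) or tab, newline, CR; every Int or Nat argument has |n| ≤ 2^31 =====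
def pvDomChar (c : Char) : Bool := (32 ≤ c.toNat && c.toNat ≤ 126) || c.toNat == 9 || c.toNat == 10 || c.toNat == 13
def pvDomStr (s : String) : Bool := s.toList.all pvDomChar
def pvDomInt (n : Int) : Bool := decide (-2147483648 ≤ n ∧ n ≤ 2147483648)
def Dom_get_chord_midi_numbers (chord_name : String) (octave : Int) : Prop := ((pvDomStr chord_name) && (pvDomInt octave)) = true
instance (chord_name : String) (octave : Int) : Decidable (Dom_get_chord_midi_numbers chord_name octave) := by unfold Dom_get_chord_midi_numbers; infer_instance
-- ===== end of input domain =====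

-- B encodes chords as stacked interval STEPS (deltas) and builds the notes with a running-pitch
-- accumulator, replacing A's absolute-interval list with its per-note //12, %12, note-name round-trip
-- (simpler; return value only, no side effects involved).

-- ===== PORT A =====
def pvIntervalsDict : PySem.Dict String (List Int) := PySem.Dict.mk
  [("major", [0, 4, 7]), ("minor", [0, 3, 7]), ("dim", [0, 3, 6]), ("aug", [0, 4, 8]),
   ("maj7", [0, 4, 7, 11]), ("m7", [0, 3, 7, 10]), ("7", [0, 4, 7, 10]),
   ("sus4", [0, 5, 7]), ("sus2", [0, 2, 7])]

def pvSemitonesDict : PySem.Dict String Int := PySem.Dict.mk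
  [("C", 0), ("C#", 1), ("Db", 1), ("D", 2), ("D#", 3), ("Eb", 3),
   ("E", 4), ("F", 5), ("F#", 6), ("Gb", 6), ("G", 7), ("G#", 8),
   ("Ab", 8), ("A", 9), ("A#", 10), ("Bb", 10), ("B", 11)]

def pvNoteNames : List String := ["C", "C#", "D", "D#", "E", "F", "F#", "G", "G#", "A", "A#", "B"]

def note_to_midi_number (note_name : String) (octave : Int) : Int :=
  12 * (octave + 1) + PySem.Dict.getD pvSemitonesDict note_name 0

-- the for-suffix loop of parse_chord_name, with its early return as Option
def pvParseLoop (chord_name : String) : List String → Option (String × String)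
  | [] => none
  | suffix :: rest =>
    if PySem.Str.endswith chord_name suffix then
      let suffix := if suffix = "minor" then "min" else suffix
      some (PySem.Str.slice chord_name none (some (-(PySem.Str.len suffix))), suffix)
    else pvParseLoop chord_name rest

def parse_chord_name (chord_name : String) : String × String :=
  match pvParseLoop chord_name ["maj7", "m7", "sus4", "sus2", "dim", "aug", "min", "minor", "7"] with
  | some r => r
  | none =>
    if PySem.Str.endswith chord_name "m" then
      (PySem.Str.slice chord_name none (some (-1)), "minor")
    else (chord_name, "major")

-- one iteration of A's for-interval loop
def pvStepA (root_semitone octave : Int) (midi_numbers : List Int) (interval : Int) : List Int :=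
  let note_semitone := root_semitone + interval
  let note_octave := octave + PySem.Int.floordiv note_semitone 12
  let note_semitone := PySem.Int.mod note_semitone 12
  -- NOTE_NAMES[note_semitone]: index is always in range (0 ≤ · < 12), so the IndexError default "" is never used
  midi_numbers ++ [note_to_midi_number ((PySem.List.pyGet? pvNoteNames note_semitone).getD "") note_octave]

def get_chord_midi_numbers (chord_name : String) (octave : Int) : List Int :=
  let rc := parse_chord_name chord_name
  let intervals := (PySem.Dict.get? pvIntervalsDict rc.2).getD (PySem.Dict.getD pvIntervalsDict "major" [])
  let root_semitone := PySem.Dict.getD pvSemitonesDict rc.1 0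
  intervals.foldl (pvStepA root_semitone octave) []

-- ===== PORT B =====
-- deltas between successive chord tones
def pvStepsDict : PySem.Dict String (List Int) := PySem.Dict.mk
  [("major", [4, 3]), ("minor", [3, 4]), ("dim", [3, 3]), ("aug", [4, 4]),
   ("maj7", [4, 3, 4]), ("m7", [3, 4, 3]), ("7", [4, 3, 3]),
   ("sus4", [5, 2]), ("sus2", [2, 5])]

-- B's running-pitch loop: note += step; notes.append(note)
def pvScanB (note : Int) : List Int → List Int
  | [] => []
  | step :: rest => (note + step) :: pvScanB (note + step) rest

def get_chord_midi_numbers_alt (chord_name : String) (octave : Int) : List Int :=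
  let rc := parse_chord_name chord_name
  let steps := (PySem.Dict.get? pvStepsDict rc.2).getD (PySem.Dict.getD pvStepsDict "major" [])
  let note := 12 * (octave + 1) + PySem.Dict.getD pvSemitonesDict rc.1 0
  note :: pvScanB note steps

-- ===== PRECONDITION & SPEC =====
def Spec_get_chord_midi_numbers (chord_name : String) (octave : Int) (out : List Int) : Prop := out = get_chord_midi_numbers_alt chord_name octave
instance (chord_name : String) (octave : Int) (out : List Int) : Decidable (Spec_get_chord_midi_numbers chord_name octave out) := by unfold Spec_get_chord_midi_numbers; infer_instance

-- ===== CLAIM (what is proved, stated in full; the proofs are below) =====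
def Claim_equal_get_chord_midi_numbers : Prop := ∀ (chord_name : String) (octave : Int), Dom_get_chord_midi_numbers chord_name octave → Spec_get_chord_midi_numbers chord_name octave (get_chord_midi_numbers chord_name octave)

-- ===== LEMMAS AND PROOFS =====

-- NOTE_NAMES[m] looked back up in SEMITONES gives m back, for 0 ≤ m < 12
lemma pv_back (m : Int) (h0 : 0 ≤ m) (h : m < 12) :
    PySem.Dict.getD pvSemitonesDict ((PySem.List.pyGet? pvNoteNames m).getD "") 0 = m := by
  interval_cases m <;> decide

-- A's loop body equals base + interval, for every root semitone s and interval i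
lemma pv_pointwise (oct s i : Int) :
    note_to_midi_number ((PySem.List.pyGet? pvNoteNames (PySem.Int.mod (s + i) 12)).getD "")
      (oct + PySem.Int.floordiv (s + i) 12) = 12 * (oct + 1) + s + i := by
  have h12 : (0 : Int) < 12 := by norm_num
  rw [note_to_midi_number, PySem.Int.mod_eq_emod_of_pos h12, PySem.Int.floordiv_eq_ediv_of_pos h12,
    pv_back ((s + i) % 12) (by omega) (by omega)]
  omega

-- A's whole side, for fixed chord type ct and root semitone s, as a map over its intervals
lemma pv_A_as_map (ct : String) (oct s : Int) :
    ((PySem.Dict.get? pvIntervalsDict ct).getD (PySem.Dict.getD pvIntervalsDict "major" [])).foldl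
      (pvStepA s oct) []
    = ((PySem.Dict.get? pvIntervalsDict ct).getD (PySem.Dict.getD pvIntervalsDict "major" [])).map
        (fun i => 12 * (oct + 1) + s + i) := by
  rw [show pvStepA s oct = (fun acc x =>
      acc ++ [note_to_midi_number ((PySem.List.pyGet? pvNoteNames (PySem.Int.mod (s + x) 12)).getD "")
        (oct + PySem.Int.floordiv (s + x) 12)]) from rfl,
    PySem.List.foldl_append_singleton_eq_map, List.nil_append]
  exact List.map_congr_left fun i _ => pv_pointwise oct s i

-- for every chord type, B's base-plus-running-steps equals the map of base+interval over A's intervals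
lemma pv_tbl (ct : String) (b : Int) :
    (b :: pvScanB b ((PySem.Dict.get? pvStepsDict ct).getD (PySem.Dict.getD pvStepsDict "major" [])))
    = ((PySem.Dict.get? pvIntervalsDict ct).getD (PySem.Dict.getD pvIntervalsDict "major" [])).map
        (fun i => b + i) := by
  have hM : PySem.Dict.getD pvStepsDict "major" [] = [4, 3] := by decide
  have hM' : PySem.Dict.getD pvIntervalsDict "major" [] = [0, 4, 7] := by decide
  rw [hM, hM']
  simp only [pvStepsDict, pvIntervalsDict, PySem.Dict.get?_mk_cons]
  split_ifs <;> simp_all [pvScanB, PySem.Dict.get?] <;> omega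

-- ===== VERDICT (by name: the statement is the Claim_ definition above) =====
theorem get_chord_midi_numbers_spec : Claim_equal_get_chord_midi_numbers := by
  intro chord_name octave _
  unfold Spec_get_chord_midi_numbers get_chord_midi_numbers get_chord_midi_numbers_alt
  dsimp only
  rw [pv_A_as_map, pv_tbl]
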